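-- pv_equiv track=rewrite | github.com/photon05/Cipher | q-9.py | determinant_mod
-- ===== SOURCE A (Python) =====
-- def determinant_mod(matrix, mod):
--     if len(matrix) == 1:
--         return matrix[0][0] % mod
--     elif len(matrix) == 2:
--         return (matrix[0][0] * matrix[1][1] - matrix[0][1] * matrix[1][0]) % mod
--     else:
--         det = 0
--         for i in range(len(matrix)):
--             sign = (-1) ** i
--             sub_det = determinant_mod([row[:i] + row[i+1:] for row in matrix[1:]], mod)
--             det += sign * matrix[0][i] * sub_det
--         return det % mod
-- ===== SOURCE B (Python) =====
-- def determinant_mod(matrix, mod):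
--     # Bottom-up subset DP (Laplace expansion memoised over column subsets):
--     # dp[mask] = det (mod `mod`) of the submatrix made of the bottom popcount(mask)
--     # rows and the columns in mask.  O(2^n * n) instead of O(n!).
--     n = len(matrix)
--     dp = [1]
--     for mask in range(1, 1 << n):
--         cols = [j for j in range(n) if (mask >> j) & 1]
--         r = n - len(cols)
--         total = 0
--         sign = 1
--         for j in cols:
--             total += sign * matrix[r][j] * dp[mask ^ (1 << j)]
--             sign = -sign
--         dp.append(total % mod)
--     return dp[-1]
-- ===== Notes on version B (the rewrite author's own statement) =====
-- stated objective: faster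
-- what changed: Replaced the O(n!) recursive cofactor expansion by an iterative bitmask dynamic program over column subsets (dp[mask] = determinant mod `mod` of the bottom popcount(mask) rows on the columns in mask), O(2^n * n).
-- outside the precondition, e.g. on determinant_mod([], 5): A returns 0, B returns 1
import Mathlib
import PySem

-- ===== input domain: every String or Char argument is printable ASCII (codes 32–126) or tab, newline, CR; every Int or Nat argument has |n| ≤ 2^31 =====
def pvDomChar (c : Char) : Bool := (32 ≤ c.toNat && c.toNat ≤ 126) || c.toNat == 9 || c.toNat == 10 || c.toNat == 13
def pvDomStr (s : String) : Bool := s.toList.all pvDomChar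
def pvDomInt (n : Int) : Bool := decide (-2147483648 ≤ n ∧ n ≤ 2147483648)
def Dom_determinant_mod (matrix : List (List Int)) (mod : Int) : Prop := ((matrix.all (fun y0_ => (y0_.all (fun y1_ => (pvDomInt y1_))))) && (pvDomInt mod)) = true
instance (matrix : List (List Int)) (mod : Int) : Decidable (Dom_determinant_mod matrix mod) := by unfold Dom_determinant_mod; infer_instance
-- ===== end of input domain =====

-- B replaces A's O(n!) recursive cofactor expansion by an iterative bitmask DP over
-- column subsets (objective: faster, asymptotically).

-- ===== PORT A =====
def determinant_mod (matrix : List (List Int)) (mod : Int) : Int :=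
  if matrix.length = 1 then
    PySem.Int.mod ((matrix.getD 0 []).getD 0 0) mod
  else if matrix.length = 2 then
    PySem.Int.mod ((matrix.getD 0 []).getD 0 0 * (matrix.getD 1 []).getD 1 0
      - (matrix.getD 0 []).getD 1 0 * (matrix.getD 1 []).getD 0 0) mod
  else
    let det := (List.range matrix.length).attach.foldl (fun det i =>
      det + (-1 : Int) ^ i.1 * (matrix.getD 0 []).getD i.1 0 *
        determinant_mod ((matrix.drop 1).map (fun row => row.take i.1 ++ row.drop (i.1 + 1))) mod) 0
    PySem.Int.mod det mod
termination_by matrix.length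
decreasing_by
  have := List.mem_range.1 i.2
  simp only [List.length_map, List.length_drop]
  omega

-- ===== PORT B =====
-- loop body of Source B's `for mask in range(1, 1 << n)` as a helper
def altStep (matrix : List (List Int)) (mod : Int) (dp : List Int) (mask : Nat) : List Int :=
  let n := matrix.length
  let cols := (List.range n).filter (fun j => (mask >>> j) &&& 1 == 1)
  let r := n - cols.length
  let ts := cols.foldl (fun (ts : Int × Int) j =>
      (ts.1 + ts.2 * (matrix.getD r []).getD j 0 * dp.getD (mask ^^^ (1 <<< j)) 0, -ts.2))
    ((0 : Int), (1 : Int))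
  dp ++ [PySem.Int.mod ts.1 mod]

def determinant_mod_alt (matrix : List (List Int)) (mod : Int) : Int :=
  let n := matrix.length
  let dp := (List.range' 1 ((1 <<< n) - 1)).foldl (altStep matrix mod) [1]
  dp.getD (dp.length - 1) 0

-- ===== PRECONDITION & SPEC =====
-- Pre_ excludes: mod = 0 (A raises ZeroDivisionError), matrices with a row shorter than the
-- number of rows (A raises IndexError), and the empty matrix, where A's 0 and B's 1 (the
-- conventional determinant of a 0x0 matrix) are both defensible.
def Pre_determinant_mod (matrix : List (List Int)) (mod : Int) : Prop :=
  mod ≠ 0 ∧ matrix ≠ [] ∧ ∀ row ∈ matrix, matrix.length ≤ row.length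
instance (matrix : List (List Int)) (mod : Int) : Decidable (Pre_determinant_mod matrix mod) := by
  unfold Pre_determinant_mod; infer_instance

def pvWitness_determinant_mod : List (List Int) × Int := ([[1, 2], [3, 4]], 5)

def Spec_determinant_mod (matrix : List (List Int)) (mod : Int) (out : Int) : Prop := out = determinant_mod_alt matrix mod
instance (matrix : List (List Int)) (mod : Int) (out : Int) : Decidable (Spec_determinant_mod matrix mod out) := by unfold Spec_determinant_mod; infer_instance

-- ===== CLAIM (what is proved, stated in full; the proofs are below) =====
def Claim_equal_determinant_mod : Prop := ∀ (matrix : List (List Int)) (mod : Int), Dom_determinant_mod matrix mod → Pre_determinant_mod matrix mod → Spec_determinant_mod matrix mod (determinant_mod matrix mod)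

-- ===== LEMMAS AND PROOFS =====

def bitsOf (n mask : Nat) : List Nat := (List.range n).filter (fun j => (mask >>> j) &&& 1 == 1)

theorem predEq (mask j : Nat) : ((mask >>> j) &&& 1 == 1) = mask.testBit j := by
  simp [Nat.testBit]

theorem tb_shift (j i : Nat) : (1 <<< j).testBit i = decide (j = i) := by
  rw [Nat.one_shiftLeft]; exact Nat.testBit_two_pow

theorem mem_bitsOf {n mask j : Nat} : j ∈ bitsOf n mask ↔ j < n ∧ mask.testBit j := by
  simp only [bitsOf, List.mem_filter, List.mem_range, predEq]

theorem nodup_bitsOf (n mask : Nat) : (bitsOf n mask).Nodup :=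
  (List.nodup_range).filter _

theorem length_bitsOf_le (n mask : Nat) : (bitsOf n mask).length ≤ n :=
  le_trans (List.length_filter_le _ _) (by simp)

theorem bitsOf_zero (n : Nat) : bitsOf n 0 = [] := by
  simp [bitsOf]

theorem bitsOf_ne_nil {n mask : Nat} (h0 : mask ≠ 0) (hlt : mask < 2 ^ n) :
    bitsOf n mask ≠ [] := by
  intro hnil
  apply h0
  apply Nat.eq_of_testBit_eq
  intro j
  rw [Nat.zero_testBit]
  by_cases hj : j < n
  · by_contra htb
    have : j ∈ bitsOf n mask := mem_bitsOf.mpr ⟨hj, by simpa using htb⟩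
    simp [hnil] at this
  · exact Nat.testBit_lt_two_pow (lt_of_lt_of_le hlt (Nat.pow_le_pow_right (by norm_num) (by omega)))

theorem bitsOf_xor {n mask j : Nat} (h : mask.testBit j = true) :
    bitsOf n (mask ^^^ (1 <<< j)) = (bitsOf n mask).filter (fun x => x ≠ j) := by
  simp only [bitsOf, List.filter_filter]
  apply List.filter_congr
  intro x _
  simp only [predEq, Nat.testBit_xor, tb_shift]
  by_cases hx : x = j
  · subst hx; simp [h]
  · simp [hx, Ne.symm hx]

theorem nodup_filter_ne (l : List Nat) (hl : l.Nodup) :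
    ∀ (i : Nat) (h : i < l.length), l.filter (fun x => x ≠ l[i]) = l.take i ++ l.drop (i + 1) := by
  induction l with
  | nil => intro i h; simp at h
  | cons a t ih =>
    intro i h
    cases i with
    | zero =>
      simp only [List.getElem_cons_zero, List.take_zero, List.drop_succ_cons, List.drop_zero,
        List.nil_append]
      rw [List.filter_cons]
      simp only [ne_eq, not_true_eq_false, decide_false]
      apply List.filter_eq_self.mpr
      intro x hx
      have : a ∉ t := (List.nodup_cons.mp hl).1
      simp only [ne_eq, decide_eq_true_eq]
      intro hxa; exact this (hxa ▸ hx)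
    | succ i =>
      have hi : i < t.length := by simp at h; omega
      simp only [List.getElem_cons_succ, List.take_succ_cons, List.drop_succ_cons,
        List.cons_append]
      rw [List.filter_cons]
      have ht : t[i] ∈ t := List.getElem_mem hi
      have hne : a ≠ t[i] := by
        intro he; exact (List.nodup_cons.mp hl).1 (he ▸ ht)
      simp only [ne_eq, hne, not_false_eq_true, decide_true, if_true]
      have := ih (List.nodup_cons.mp hl).2 i hi
      simp only [ne_eq] at this
      exact congrArg (List.cons a) this

theorem xor_lt_self {mask j : Nat} (h : mask.testBit j = true) : mask ^^^ (1 <<< j) < mask := by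
  apply Nat.lt_of_testBit j
  · rw [Nat.testBit_xor, tb_shift]; simp [h]
  · exact h
  · intro k hk
    rw [Nat.testBit_xor, tb_shift]
    simp [Nat.ne_of_lt hk]


def minorMap (i : Nat) (m : List (List Int)) : List (List Int) :=
  m.map (fun row => row.take i ++ row.drop (i + 1))

def cdet : List (List Int) → Int
  | [] => 1
  | r0 :: rest =>
    ((List.range (rest.length + 1)).map (fun i =>
      (-1 : Int) ^ i * r0.getD i 0 * cdet (minorMap i rest))).sum
termination_by m => m.length
decreasing_by simp [minorMap]

def subm (m : List (List Int)) (mask : Nat) : List (List Int) :=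
  (m.drop (m.length - (bitsOf m.length mask).length)).map
    (fun row => (bitsOf m.length mask).map (fun j => row.getD j 0))

def Dv (m : List (List Int)) (mod : Int) (mask : Nat) : Int :=
  if mask = 0 then 1 else PySem.Int.mod (cdet (subm m mask)) mod

def sSum (F : Nat → Int) : List Nat → Int
  | [] => 0
  | j :: l => F j - sSum F l

theorem pymod_sub_dvd (x b : Int) : b ∣ (PySem.Int.mod x b - x) := by
  have h := PySem.Int.floordiv_mul_add_mod x b
  exact ⟨-(PySem.Int.floordiv x b), by linarith [h]⟩

theorem pymod_congr {x y b : Int} (h : b ∣ x - y) : PySem.Int.mod x b = PySem.Int.mod y b := by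
  rcases eq_or_ne b 0 with rfl | hb
  · obtain rfl : x = y := by
      have := zero_dvd_iff.mp h; omega
    rfl
  · rcases lt_or_gt_of_ne hb with hneg | hpos
    · have b1 := PySem.Int.mod_neg_bounds x hneg
      have b2 := PySem.Int.mod_neg_bounds y hneg
      have d1 := pymod_sub_dvd x b
      have d2 := pymod_sub_dvd y b
      have : b ∣ (PySem.Int.mod x b - PySem.Int.mod y b) := by
        have := dvd_sub (dvd_add d1 h) d2
        have e : PySem.Int.mod x b - x + (x - y) - (PySem.Int.mod y b - y)
            = PySem.Int.mod x b - PySem.Int.mod y b := by ring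
        rwa [e] at this
      obtain ⟨k, hk⟩ := this
      have hb' : b ≤ -1 := by omega
      rcases lt_trichotomy k 0 with h' | rfl | h'
      · nlinarith
      · omega
      · nlinarith
    · have b1 := PySem.Int.mod_nonneg x hpos
      have b2 := PySem.Int.mod_nonneg y hpos
      have c1 := PySem.Int.mod_lt x hpos
      have c2 := PySem.Int.mod_lt y hpos
      have d1 := pymod_sub_dvd x b
      have d2 := pymod_sub_dvd y b
      have : b ∣ (PySem.Int.mod x b - PySem.Int.mod y b) := by
        have := dvd_sub (dvd_add d1 h) d2
        have e : PySem.Int.mod x b - x + (x - y) - (PySem.Int.mod y b - y)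
            = PySem.Int.mod x b - PySem.Int.mod y b := by ring
        rwa [e] at this
      obtain ⟨k, hk⟩ := this
      rcases lt_trichotomy k 0 with h' | rfl | h'
      · nlinarith
      · omega
      · nlinarith


theorem sSum_eq_altSum (F : Nat → Int) (l : List Nat) :
    sSum F l = ((List.range l.length).map (fun i => (-1 : Int) ^ i * F (l.getD i 0))).sum := by
  induction l with
  | nil => simp [sSum]
  | cons j l ih =>
    rw [List.length_cons, List.range_succ_eq_map]
    simp only [List.map_cons, List.map_map, List.sum_cons]
    have e : ((List.range l.length).map ((fun i => (-1 : Int) ^ i * F ((j :: l).getD i 0)) ∘ Nat.succ))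
        = (List.range l.length).map (fun i => (-1 : Int) * ((fun i => (-1 : Int) ^ i * F (l.getD i 0)) i)) := by
      apply List.map_congr_left
      intro i hi
      simp [pow_succ]
    rw [e]
    have e2 : (List.map (fun i => (-1 : Int) * ((fun i => (-1 : Int) ^ i * F (l.getD i 0)) i)) (List.range l.length)).sum
        = (-1 : Int) * ((List.range l.length).map (fun i => (-1 : Int) ^ i * F (l.getD i 0))).sum := by
      rw [← List.sum_map_mul_left]
    rw [e2, ← ih]
    simp [sSum]
    ring


theorem dvd_sum_sub {α : Type} (b : Int) (l : List α) (f g : α → Int)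
    (h : ∀ x ∈ l, b ∣ f x - g x) : b ∣ ((l.map f).sum - (l.map g).sum) := by
  induction l with
  | nil => simp
  | cons x l ih =>
    simp only [List.map_cons, List.sum_cons]
    have e : f x + (l.map f).sum - (g x + (l.map g).sum)
        = (f x - g x) + ((l.map f).sum - (l.map g).sum) := by ring
    rw [e]
    exact dvd_add (h x (.head l)) (ih (fun y hy => h y (.tail x hy)))

theorem thmA : ∀ (N : Nat) (m : List (List Int)) (mod : Int), m.length ≤ N → m ≠ [] → mod ≠ 0 →
    determinant_mod m mod = PySem.Int.mod (cdet m) mod := by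
  intro N
  induction N with
  | zero => intro m mod h hne _; cases m <;> simp_all
  | succ N ih =>
    intro m mod hlen hne hmod
    obtain ⟨r0, rest, rfl⟩ : ∃ r0 rest, m = r0 :: rest := by
      cases m with | nil => exact absurd rfl hne | cons a l => exact ⟨a, l, rfl⟩
    by_cases h1 : (r0 :: rest).length = 1
    · obtain rfl : rest = [] := by simpa using h1
      rw [determinant_mod]
      simp [cdet, minorMap]
    · by_cases h2 : (r0 :: rest).length = 2
      · obtain ⟨r1, rfl⟩ : ∃ r1, rest = [r1] := by
          cases rest with
          | nil => simp at h2
          | cons a l => cases l with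
            | nil => exact ⟨a, rfl⟩
            | cons b l' => simp at h2
        rw [determinant_mod]
        simp only [List.length_cons]
        have : cdet [r0, r1] = r0.getD 0 0 * r1.getD 1 0 - r0.getD 1 0 * r1.getD 0 0 := by
          cases r1 with
          | nil => simp [cdet, minorMap, List.range_succ]
          | cons a t => simp [cdet, minorMap, List.range_succ]; ring
        rw [this]
        rfl
      · rw [determinant_mod]
        simp only [if_neg h1, if_neg h2]
        rw [PySem.List.foldl_add]
        have hL : 3 ≤ (r0 :: rest).length := by
          have := List.length_cons (a := r0) (as := rest); omega
        have hrest : rest ≠ [] := by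
          intro h; subst h; simp at hL
        have step1 : ((List.range (r0 :: rest).length).attach.map (fun i =>
            (-1 : Int) ^ i.1 * ((r0 :: rest).getD 0 []).getD i.1 0 *
              determinant_mod (((r0 :: rest).drop 1).map (fun row => row.take i.1 ++ row.drop (i.1 + 1))) mod))
            = (List.range (r0 :: rest).length).attach.map (fun i =>
              (-1 : Int) ^ i.1 * r0.getD i.1 0 * PySem.Int.mod (cdet (minorMap i.1 rest)) mod) := by
          apply List.map_congr_left
          intro i _
          have : determinant_mod (minorMap i.1 rest) mod = PySem.Int.mod (cdet (minorMap i.1 rest)) mod := by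
            apply ih _ mod _ _ hmod
            · simp only [minorMap, List.length_map]
              have := List.length_cons (a := r0) (as := rest)
              omega
            · simp [minorMap, hrest]
          simp only [minorMap] at this ⊢
          simp [this]
        rw [step1]
        have step2 : ((List.range (r0 :: rest).length).attach.map (fun i =>
              (-1 : Int) ^ i.1 * r0.getD i.1 0 * PySem.Int.mod (cdet (minorMap i.1 rest)) mod)).sum
            = ((List.range (r0 :: rest).length).map (fun i =>
              (-1 : Int) ^ i * r0.getD i 0 * PySem.Int.mod (cdet (minorMap i rest)) mod)).sum := by
          congr 1
          exact List.attach_map_val (l := List.range (r0 :: rest).length)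
            (f := fun i => (-1 : Int) ^ i * r0.getD i 0 * PySem.Int.mod (cdet (minorMap i rest)) mod)
        rw [step2]
        apply pymod_congr
        have hc : cdet (r0 :: rest) = ((List.range (rest.length + 1)).map (fun i =>
            (-1 : Int) ^ i * r0.getD i 0 * cdet (minorMap i rest))).sum := by
          rw [cdet]
        rw [hc]
        simp only [List.length_cons, zero_add]
        exact dvd_sum_sub mod _ _ _ (fun i _ => by
          have := pymod_sub_dvd (cdet (minorMap i rest)) mod
          have e : (-1 : Int) ^ i * r0.getD i 0 * PySem.Int.mod (cdet (minorMap i rest)) mod -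
              (-1 : Int) ^ i * r0.getD i 0 * cdet (minorMap i rest)
              = (-1 : Int) ^ i * r0.getD i 0 * (PySem.Int.mod (cdet (minorMap i rest)) mod - cdet (minorMap i rest)) := by ring
          rw [e]
          exact Dvd.dvd.mul_left this _)


theorem subm_zero (m : List (List Int)) : subm m 0 = [] := by
  simp [subm, bitsOf_zero]

theorem dv_cdet_dvd (m : List (List Int)) (mod : Int) (k : Nat) :
    mod ∣ Dv m mod k - cdet (subm m k) := by
  by_cases hk : k = 0
  · subst hk; simp [Dv, subm_zero, cdet]
  · simp only [Dv, if_neg hk]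
    exact pymod_sub_dvd _ _

theorem dv_step (m : List (List Int)) (mod : Int) (mask : Nat)
    (h0 : mask ≠ 0) (hlt : mask < 2 ^ m.length) :
    PySem.Int.mod (sSum (fun j => (m.getD (m.length - (bitsOf m.length mask).length) []).getD j 0
        * Dv m mod (mask ^^^ (1 <<< j))) (bitsOf m.length mask)) mod
      = Dv m mod mask := by
  set n := m.length with hn
  set bl := bitsOf n mask with hbl
  set len := bl.length with hlen
  set r := n - len with hr
  have hblne : bl ≠ [] := bitsOf_ne_nil h0 hlt
  have hlenpos : 0 < len := List.length_pos_iff.mpr hblne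
  have hlenle : len ≤ n := length_bitsOf_le n mask
  have hrn : r < n := by omega
  have hrm : r < m.length := by omega
  -- the submatrix, split into first row and rest
  have hdrop : m.drop r = m[r] :: m.drop (r + 1) := List.drop_eq_getElem_cons hrm
  have hsub : subm m mask
      = (bl.map (fun j => m[r].getD j 0)) :: (m.drop (r + 1)).map (fun row => bl.map (fun j => row.getD j 0)) := by
    rw [subm, ← hbl, ← hlen, ← hr, hdrop]
    simp only [List.map_cons]
  have htl : ((m.drop (r + 1)).map (fun row => bl.map (fun j => row.getD j 0))).length = len - 1 := by
    simp [List.length_map, List.length_drop]; omega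
  -- expand cdet of the submatrix
  have hcd : cdet (subm m mask)
      = ((List.range len).map (fun i =>
          (-1 : Int) ^ i * (bl.map (fun j => m[r].getD j 0)).getD i 0 *
            cdet (minorMap i ((m.drop (r + 1)).map (fun row => bl.map (fun j => row.getD j 0)))))).sum := by
    rw [hsub, cdet, htl]
    have : len - 1 + 1 = len := by omega
    rw [this]
  -- rewrite the alternating sum as a range sum
  rw [sSum_eq_altSum]
  rw [← hlen]
  have hDv : Dv m mod mask = PySem.Int.mod (cdet (subm m mask)) mod := by
    rw [Dv, if_neg h0]
  rw [hDv, hcd]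
  apply pymod_congr
  apply dvd_sum_sub
  intro i hi
  have hi' : i < len := List.mem_range.mp hi
  have hgd : bl.getD i 0 = bl[i] := List.getD_eq_getElem bl 0 hi'
  have hjmem : bl[i] ∈ bl := List.getElem_mem hi'
  have hjlt : bl[i] < n := (mem_bitsOf.mp hjmem).1
  have hjtb : mask.testBit bl[i] = true := (mem_bitsOf.mp hjmem).2
  -- entry equality
  have hentry : (bl.map (fun j => m[r].getD j 0)).getD i 0 = (m.getD r []).getD bl[i] 0 := by
    rw [List.getD_eq_getElem _ 0 (by simpa using hi'), List.getElem_map,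
      List.getD_eq_getElem m [] hrm]
  -- minor equality
  have hbl' : bitsOf n (mask ^^^ (1 <<< bl[i])) = bl.take i ++ bl.drop (i + 1) := by
    rw [bitsOf_xor hjtb, ← hbl]
    have := nodup_filter_ne bl (nodup_bitsOf n mask) i hi'
    simpa using this
  have hlen' : (bitsOf n (mask ^^^ (1 <<< bl[i]))).length = len - 1 := by
    rw [hbl']; simp; omega
  have hminor : minorMap i ((m.drop (r + 1)).map (fun row => bl.map (fun j => row.getD j 0)))
      = subm m (mask ^^^ (1 <<< bl[i])) := by
    rw [minorMap, subm, ← hn, hlen', List.map_map]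
    have harg : n - (len - 1) = r + 1 := by omega
    rw [harg, hbl']
    apply List.map_congr_left
    intro row _
    simp only [Function.comp]
    rw [← List.map_take, ← List.map_drop, ← List.map_append]
  rw [hgd, hentry, hminor]
  have e : (-1 : Int) ^ i * ((m.getD r []).getD bl[i] 0 * Dv m mod (mask ^^^ (1 <<< bl[i])))
        - (-1 : Int) ^ i * (m.getD r []).getD bl[i] 0 * cdet (subm m (mask ^^^ (1 <<< bl[i])))
      = (-1 : Int) ^ i * (m.getD r []).getD bl[i] 0 *
          (Dv m mod (mask ^^^ (1 <<< bl[i])) - cdet (subm m (mask ^^^ (1 <<< bl[i])))) := by ring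
  rw [e]
  exact Dvd.dvd.mul_left (dv_cdet_dvd m mod _) _

theorem fold_sign (E D : Nat → Int) (l : List Nat) (t s : Int) :
    (l.foldl (fun (ts : Int × Int) j => (ts.1 + ts.2 * E j * D j, -ts.2)) (t, s)).1
      = t + s * sSum (fun j => E j * D j) l := by
  induction l generalizing t s with
  | nil => simp [sSum]
  | cons j l ih => simp [sSum, ih]; ring

theorem sSum_congr {F G : Nat → Int} {l : List Nat} (h : ∀ j ∈ l, F j = G j) :
    sSum F l = sSum G l := by
  induction l with
  | nil => rfl
  | cons j l ih =>
    simp only [sSum]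
    rw [h j (.head l), ih (fun x hx => h x (.tail j hx))]

theorem dpInv (m : List (List Int)) (mod : Int) :
    ∀ K, K ≤ 2 ^ m.length - 1 →
      (List.range' 1 K).foldl (altStep m mod) [1] = (List.range (K + 1)).map (Dv m mod) := by
  intro K
  induction K with
  | zero => intro _; simp [Dv]
  | succ K ih =>
    intro h
    rw [List.range'_1_concat, List.foldl_append, ih (by omega)]
    have h2n : 0 < 2 ^ m.length := Nat.two_pow_pos _
    have hmask : 1 + K < 2 ^ m.length := by omega
    have hmask0 : 1 + K ≠ 0 := by omega
    rw [List.foldl_cons, List.foldl_nil]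
    show altStep m mod ((List.range (K + 1)).map (Dv m mod)) (1 + K) = _
    rw [altStep]
    have hcols : (List.range m.length).filter (fun j => ((1 + K) >>> j) &&& 1 == 1)
        = bitsOf m.length (1 + K) := rfl
    rw [hcols]
    rw [fold_sign]
    have hre : sSum (fun j => (m.getD (m.length - (bitsOf m.length (1 + K)).length) []).getD j 0 *
          ((List.range (K + 1)).map (Dv m mod)).getD ((1 + K) ^^^ (1 <<< j)) 0) (bitsOf m.length (1 + K))
        = sSum (fun j => (m.getD (m.length - (bitsOf m.length (1 + K)).length) []).getD j 0 *
          Dv m mod ((1 + K) ^^^ (1 <<< j))) (bitsOf m.length (1 + K)) := by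
      apply sSum_congr
      intro j hj
      have htb : (1 + K).testBit j = true := (mem_bitsOf.mp hj).2
      have hlt := xor_lt_self htb
      rw [PySem.List.getD_map_range _ _ _ _ (by omega)]
    rw [hre]
    have := dv_step m mod (1 + K) hmask0 hmask
    rw [zero_add, one_mul, this]
    rw [List.range_succ (n := K + 1), List.map_append, List.map_cons, List.map_nil]
    have : 1 + K = K + 1 := by omega
    rw [this]

theorem thmB (m : List (List Int)) (mod : Int) (hne : m ≠ []) (_hmod : mod ≠ 0) :
    determinant_mod_alt m mod = PySem.Int.mod (cdet (subm m (2 ^ m.length - 1))) mod := by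
  have hnpos : 0 < m.length := List.length_pos_iff.mpr hne
  have h2n : 2 ≤ 2 ^ m.length := by
    calc 2 = 2 ^ 1 := by norm_num
    _ ≤ 2 ^ m.length := Nat.pow_le_pow_right (by norm_num) hnpos
  rw [determinant_mod_alt]
  simp only [Nat.one_shiftLeft]
  rw [dpInv m mod (2 ^ m.length - 1) le_rfl]
  have hl : ((List.range (2 ^ m.length - 1 + 1)).map (Dv m mod)).length = 2 ^ m.length := by
    simp; omega
  rw [hl]
  rw [PySem.List.getD_map_range _ _ _ _ (by omega)]
  rw [Dv, if_neg (by omega)]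

theorem subm_full (m : List (List Int)) (h : ∀ row ∈ m, m.length ≤ row.length) :
    subm m (2 ^ m.length - 1) = m.map (fun r => r.take m.length) := by
  have hb : bitsOf m.length (2 ^ m.length - 1) = List.range m.length := by
    rw [bitsOf]
    apply List.filter_eq_self.mpr
    intro j hj
    rw [predEq, Nat.testBit_two_pow_sub_one]
    simpa using List.mem_range.mp hj
  rw [subm, hb, List.length_range, Nat.sub_self, List.drop_zero]
  apply List.map_congr_left
  intro row hrow
  have hlen : m.length ≤ row.length := h row hrow
  apply List.ext_getElem
  · simp; omega
  · intro i h1 h2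
    simp only [List.getElem_map, List.getElem_range, List.getElem_take]
    have hi : i < m.length := by simpa using h1
    rw [List.getD_eq_getElem row 0 (by omega)]

theorem row_take (r : List Int) (i k : Nat) (hik : i < k) :
    (r.take k).take i ++ (r.take k).drop (i + 1) = (r.take i ++ r.drop (i + 1)).take (k - 1) := by
  rcases le_or_gt r.length i with hle | hgt
  · have h1 : r.take k = r := List.take_of_length_le (by omega)
    have h2 : r.take i = r := List.take_of_length_le hle
    have h3 : r.drop (i + 1) = [] := List.drop_eq_nil_of_le (by omega)
    rw [h1, h2, h3, List.append_nil, List.take_of_length_le (by omega)]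
  · have h1 : (r.take k).take i = r.take i := by
      rw [List.take_take, Nat.min_eq_left (by omega)]
    have h2 : (r.take k).drop (i + 1) = (r.drop (i + 1)).take (k - (i + 1)) := List.drop_take
    have h3 : (r.take i ++ r.drop (i + 1)).take (k - 1)
        = (r.take i).take (k - 1) ++ (r.drop (i + 1)).take (k - 1 - (r.take i).length) :=
      List.take_append
    have h4 : (r.take i).take (k - 1) = r.take i := by
      rw [List.take_take, Nat.min_eq_right (by omega)]
    have h5 : (r.take i).length = i := by rw [List.length_take]; omega
    rw [h1, h2, h3, h4, h5]
    congr 2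
    omega

theorem cdet_take_aux : ∀ (N : Nat) (m : List (List Int)) (k : Nat), m.length ≤ N → m.length ≤ k →
    cdet (m.map (fun r => r.take k)) = cdet m := by
  intro N
  induction N with
  | zero =>
    intro m k h _
    have : m = [] := by cases m <;> simp_all
    subst this; rfl
  | succ N ih =>
    intro m k hN hk
    cases m with
    | nil => rfl
    | cons r0 rest =>
      rw [List.map_cons, cdet, cdet]
      have hlr : (rest.map (fun r => r.take k)).length = rest.length := by simp
      rw [hlr]
      congr 1
      apply List.map_congr_left
      intro i hi
      have hi' : i < rest.length + 1 := List.mem_range.mp hi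
      have hik : i < k := by
        have := List.length_cons (a := r0) (as := rest)
        omega
      have hentry : (r0.take k).getD i 0 = r0.getD i 0 := by
        simp only [List.getD_eq_getElem?_getD, List.getElem?_take]
        rw [if_pos hik]
      have hminor : minorMap i (rest.map (fun r => r.take k))
          = (minorMap i rest).map (fun r => r.take (k - 1)) := by
        rw [minorMap, minorMap, List.map_map, List.map_map]
        apply List.map_congr_left
        intro row _
        simp only [Function.comp]
        exact row_take row i k hik
      rw [hentry, hminor]
      have hcd : cdet ((minorMap i rest).map (fun r => r.take (k - 1))) = cdet (minorMap i rest) := by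
        apply ih
        · simp only [minorMap, List.length_map]
          have := List.length_cons (a := r0) (as := rest)
          omega
        · simp only [minorMap, List.length_map]
          have := List.length_cons (a := r0) (as := rest)
          omega
      rw [hcd]

-- ===== VERDICT (by name: the statement is the Claim_ definition above) =====
theorem determinant_mod_spec : Claim_equal_determinant_mod := by
  intro m mod _ hpre
  obtain ⟨hmod, hne, hrows⟩ := hpre
  unfold Spec_determinant_mod
  rw [thmA m.length m mod le_rfl hne hmod, thmB m mod hne hmod, subm_full m hrows,
    cdet_take_aux m.length m m.length le_rfl le_rfl]
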